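-- pv_equiv track=rewrite | github.com/yejh123/VibeLens | src/vibelens/ingest/anonymize/rule_anonymizer/patterns.py | has_mixed_char_types
-- ===== SOURCE A (Python) =====
-- def has_mixed_char_types(text: str) -> bool:
--     """Check if text contains a mix of character types (letters, digits, symbols).
--
--     Secrets typically mix character types while natural language tends to
--     be mostly alphabetic with spaces.
--
--     Args:
--         text: The string to check.
--
--     Returns:
--         True if at least 3 of {uppercase, lowercase, digits, symbols} are present.
--     """
--     type_count = sum(
--         [
--             any(c.isupper() for c in text),
--             any(c.islower() for c in text),
--             any(c.isdigit() for c in text),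
--             any(not c.isalnum() and not c.isspace() for c in text),
--         ]
--     )
--     MIN_MIXED_TYPES = 3
--     return type_count >= MIN_MIXED_TYPES
-- ===== SOURCE B (Python) =====
-- def has_mixed_char_types(text: str) -> bool:
--     """Single pass maintaining four flags, returning early once 3 types are seen."""
--     up = lo = di = sy = False
--     for c in text:
--         if c.isupper():
--             up = True
--         if c.islower():
--             lo = True
--         if c.isdigit():
--             di = True
--         if not c.isalnum() and not c.isspace():
--             sy = True
--         if up + lo + di + sy >= 3:
--             return True
--     return up + lo + di + sy >= 3
-- ===== Notes on version B (the rewrite author's own statement) =====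
-- stated objective: alternative
-- what changed: Replaces four separate any()-scans over the text plus a sum with a single pass that accumulates four boolean flags and returns early as soon as three character types have been seen.
import Mathlib
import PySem

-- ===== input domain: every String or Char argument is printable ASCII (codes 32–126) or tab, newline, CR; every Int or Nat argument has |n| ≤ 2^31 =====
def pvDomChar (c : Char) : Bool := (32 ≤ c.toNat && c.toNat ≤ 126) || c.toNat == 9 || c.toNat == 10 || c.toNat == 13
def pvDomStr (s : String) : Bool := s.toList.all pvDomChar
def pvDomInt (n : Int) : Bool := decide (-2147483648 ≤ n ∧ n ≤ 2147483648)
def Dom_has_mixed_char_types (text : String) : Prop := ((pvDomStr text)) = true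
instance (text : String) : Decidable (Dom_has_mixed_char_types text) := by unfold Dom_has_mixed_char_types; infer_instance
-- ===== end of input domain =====

-- B replaces A's four separate any()-scans with one pass over the text keeping four flags, with an early return once three types are seen (objective: alternative).

-- ===== PORT A =====
def has_mixed_char_types (text : String) : Bool :=
  let cs := text.toList
  let type_count : Int :=
    ([ cs.any (fun c => PySem.Chars.isupper c),
       cs.any (fun c => PySem.Chars.islower c),
       cs.any (fun c => PySem.Chars.isdigit c),
       cs.any (fun c => !PySem.Chars.isalnum c && !PySem.Chars.isspace c)
     ].map (fun b => if b then (1 : Int) else 0)).sum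
  decide (3 ≤ type_count)

-- ===== PORT B =====
-- bool-to-int sum of the four flags, as in `up + lo + di + sy` in Source B
def pvFlagCount (up lo di sy : Bool) : Nat :=
  (if up then 1 else 0) + (if lo then 1 else 0) + (if di then 1 else 0) + (if sy then 1 else 0)

def pvAltLoop (cs : List Char) (up lo di sy : Bool) : Bool :=
  match cs with
  | [] => decide (3 ≤ pvFlagCount up lo di sy)
  | c :: rest =>
    let up := up || PySem.Chars.isupper c
    let lo := lo || PySem.Chars.islower c
    let di := di || PySem.Chars.isdigit c
    let sy := sy || (!PySem.Chars.isalnum c && !PySem.Chars.isspace c)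
    if 3 ≤ pvFlagCount up lo di sy then true else pvAltLoop rest up lo di sy

def has_mixed_char_types_alt (text : String) : Bool :=
  pvAltLoop text.toList false false false false

-- ===== PRECONDITION & SPEC =====
def Spec_has_mixed_char_types (text : String) (out : Bool) : Prop := out = has_mixed_char_types_alt text
instance (text : String) (out : Bool) : Decidable (Spec_has_mixed_char_types text out) := by unfold Spec_has_mixed_char_types; infer_instance

-- ===== CLAIM (what is proved, stated in full; the proofs are below) =====
def Claim_equal_has_mixed_char_types : Prop := ∀ (text : String), Dom_has_mixed_char_types text → Spec_has_mixed_char_types text (has_mixed_char_types text)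

-- ===== LEMMAS AND PROOFS =====

theorem pvFlagCount_mono (a b c d a' b' c' d' : Bool) (h : 3 ≤ pvFlagCount a b c d) :
    3 ≤ pvFlagCount (a || a') (b || b') (c || c') (d || d') := by
  revert h; cases a <;> cases b <;> cases c <;> cases d <;> cases a' <;> cases b' <;> cases c' <;> cases d' <;> decide

theorem pvAltLoop_eq (cs : List Char) (up lo di sy : Bool) :
    pvAltLoop cs up lo di sy =
      decide (3 ≤ pvFlagCount
        (up || cs.any (fun c => PySem.Chars.isupper c))
        (lo || cs.any (fun c => PySem.Chars.islower c))
        (di || cs.any (fun c => PySem.Chars.isdigit c))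
        (sy || cs.any (fun c => !PySem.Chars.isalnum c && !PySem.Chars.isspace c))) := by
  induction cs generalizing up lo di sy with
  | nil => simp [pvAltLoop]
  | cons c rest ih =>
    simp only [pvAltLoop, List.any_cons]
    split
    · next h =>
      have := pvFlagCount_mono _ _ _ _
        (rest.any (fun c => PySem.Chars.isupper c))
        (rest.any (fun c => PySem.Chars.islower c))
        (rest.any (fun c => PySem.Chars.isdigit c))
        (rest.any (fun c => !PySem.Chars.isalnum c && !PySem.Chars.isspace c)) h
      simp only [Bool.or_assoc] at this
      exact (decide_eq_true this).symm
    · rw [ih]; simp only [Bool.or_assoc]; rfl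

-- ===== VERDICT (by name: the statement is the Claim_ definition above) =====
theorem has_mixed_char_types_spec : Claim_equal_has_mixed_char_types := by
  intro text _
  show _ = _
  unfold has_mixed_char_types has_mixed_char_types_alt
  rw [pvAltLoop_eq]
  simp only [Bool.false_or]
  generalize text.toList.any (fun c => PySem.Chars.isupper c) = a
  generalize text.toList.any (fun c => PySem.Chars.islower c) = b
  generalize text.toList.any (fun c => PySem.Chars.isdigit c) = c
  generalize text.toList.any (fun x => !PySem.Chars.isalnum x && !PySem.Chars.isspace x) = d
  cases a <;> cases b <;> cases c <;> cases d <;> decide
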